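-- pv_equiv track=rewrite | github.com/Jinnie-J/Algorithm-study | programmers/[힙]더맵게.py | solution
-- ===== SOURCE A (Python) =====
-- import heapq
--
-- def solution(scoville, K):
--     answer = 0
--
--     heapq.heapify(scoville)
--
--     while True:
--         if len(scoville) == 1 and scoville[0] < K:
--             return -1
--         a = heapq.heappop(scoville)
--         if a < K:
--             b = heapq.heappop(scoville)
--             heapq.heappush(scoville, a + (b * 2))
--             answer += 1
--         else:
--             return answer
-- ===== SOURCE B (Python) =====
-- def solution(scoville, K):
--     # Sorted-list strategy: sort once, repeatedly mix the two front (smallest)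
--     # elements and insert the mix back at its sorted position by a linear scan.
--     s = sorted(scoville)
--     count = 0
--     while s[0] < K:
--         if len(s) == 1:
--             return -1
--         a = s.pop(0)
--         b = s.pop(0)
--         new = a + 2 * b
--         i = 0
--         while i < len(s) and s[i] < new:
--             i += 1
--         s.insert(i, new)
--         count += 1
--     return count
-- ===== Notes on version B (the rewrite author's own statement) =====
-- stated objective: alternative
-- what changed: Replaces the binary heap (heapify/heappop/heappush) by a fully sorted list maintained invariantly: sort once, pop the two front elements, reinsert the mix at its sorted position found by a scan.
import Mathlib
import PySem

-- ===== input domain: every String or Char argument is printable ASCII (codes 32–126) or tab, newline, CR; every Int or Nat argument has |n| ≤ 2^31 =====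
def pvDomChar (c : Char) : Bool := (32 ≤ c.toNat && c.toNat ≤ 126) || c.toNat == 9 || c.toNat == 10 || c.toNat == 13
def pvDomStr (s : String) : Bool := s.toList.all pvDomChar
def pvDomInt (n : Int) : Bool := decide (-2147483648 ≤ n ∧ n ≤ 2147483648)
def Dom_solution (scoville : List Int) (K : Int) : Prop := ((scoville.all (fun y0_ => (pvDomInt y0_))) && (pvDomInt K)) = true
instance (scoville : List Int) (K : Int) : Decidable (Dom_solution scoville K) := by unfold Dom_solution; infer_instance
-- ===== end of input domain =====

-- B replaces A's binary heap by a fully sorted list (sort once, pop two front, reinsert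
-- the mix at its sorted position); same return value; A mutates its argument in Python,
-- B does not — the claim proved here is about the return value only.


-- ===== PORT A =====
-- heapq is modeled by its documented observable contract: after heapify, heappop
-- returns and removes the smallest element (the heap's internal array layout is not
-- observable in A's return value, which depends only on the multiset of elements).
def heapPop? (l : List Int) : Option (Int × List Int) :=
  match PySem.List.min? l (fun x => x) with
  | none => none
  | some m =>
    match PySem.List.remove? l m with
    | none => none
    | some r => some (m, r)

theorem heapPop?_length {l : List Int} {a : Int} {r : List Int}
    (h : heapPop? l = some (a, r)) : r.length + 1 = l.length := by
  unfold heapPop? at h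
  cases hm : PySem.List.min? l (fun x => x) with
  | none => rw [hm] at h; exact absurd h (by simp)
  | some m =>
    rw [hm] at h; dsimp only at h
    cases hr : PySem.List.remove? l m with
    | none => rw [hr] at h; exact absurd h (by simp)
    | some r' =>
      rw [hr] at h; dsimp only at h
      cases h
      have hmem : a ∈ l := by
        by_contra hnot
        rw [(PySem.List.remove?_eq_none_iff l a).2 hnot] at hr; exact absurd hr (by simp)
      rw [PySem.List.remove?_eq_some_erase l a hmem] at hr
      injection hr with hv
      subst hv
      have hlen := List.length_erase_of_mem hmem
      have : 0 < l.length := List.length_pos_of_mem hmem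
      omega

-- the while-True loop of A (answer accumulator); the `0` branches are where Python's
-- heappop raises IndexError (excluded by Pre_solution)
def loopA (K : Int) (l : List Int) (answer : Int) : Int :=
  if l.length = 1 ∧ l.headD 0 < K then -1
  else
    match h : heapPop? l with
    | none => 0
    | some (a, rest) =>
      if a < K then
        match h2 : heapPop? rest with
        | none => 0
        | some (b, rest2) => loopA K ((a + b * 2) :: rest2) (answer + 1)
      else answer
termination_by l.length
decreasing_by
  have := heapPop?_length h
  have := heapPop?_length h2
  simp; omega

def solution (scoville : List Int) (K : Int) : Int := loopA K scoville 0

-- ===== PORT B =====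
-- transliteration of Source B's inner scan: `i = 0; while i < len(s) and s[i] < new: i += 1`
def insPos (s : List Int) (new : Int) (i : Nat) : Nat :=
  if h : i < s.length then
    if s[i] < new then insPos s new (i + 1) else i
  else i
termination_by s.length - i

-- the outer while-loop of Source B; the `0` branch is where Python's s[0] raises IndexError
def loopB (K : Int) (s : List Int) (count : Int) : Int :=
  match s with
  | [] => 0
  | x :: t =>
    if x < K then
      if (x :: t).length = 1 then -1
      else
        match t with
        | [] => 0
        | b :: rest =>
          loopB K (PySem.List.insert rest ((insPos rest (x + 2 * b) 0 : Nat) : Int) (x + 2 * b)) (count + 1)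
    else count
termination_by s.length
decreasing_by simp [PySem.List.length_insert]

def solution_alt (scoville : List Int) (K : Int) : Int :=
  loopB K (PySem.List.sorted scoville (fun x => x) false) 0

-- ===== PRECONDITION & SPEC =====
-- Pre_ excludes only the empty list, on which both A and B raise IndexError.
def Pre_solution (scoville : List Int) (_K : Int) : Prop := scoville ≠ []
instance (scoville : List Int) (K : Int) : Decidable (Pre_solution scoville K) := by unfold Pre_solution; infer_instance
def pvWitness_solution : List Int × Int := ([1, 2, 3, 9, 10, 12], 7)

def Spec_solution (scoville : List Int) (K : Int) (out : Int) : Prop := out = solution_alt scoville K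
instance (scoville : List Int) (K : Int) (out : Int) : Decidable (Spec_solution scoville K out) := by unfold Spec_solution; infer_instance

-- ===== CLAIM (what is proved, stated in full; the proofs are below) =====
def Claim_equal_solution : Prop := ∀ (scoville : List Int) (K : Int), Dom_solution scoville K → Pre_solution scoville K → Spec_solution scoville K (solution scoville K)

-- ===== LEMMAS AND PROOFS =====


theorem heapPop?_of_perm_sorted {l : List Int} {x : Int} {t : List Int}
    (hp : l.Perm (x :: t)) (hs : (x :: t).Pairwise (· ≤ ·)) :
    heapPop? l = some (x, l.erase x) ∧ (l.erase x).Perm t := by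
  have hxl : x ∈ l := hp.mem_iff.2 (List.mem_cons_self)
  cases hm : PySem.List.min? l (fun y => y) with
  | none =>
    rw [(PySem.List.min?_eq_none_iff l _).1 hm] at hxl; exact absurd hxl (by simp)
  | some m =>
    have hmem : m ∈ l := PySem.List.min?_mem hm
    have hmin : ∀ y ∈ l, m ≤ y := PySem.List.min?_isMin hm
    have hmx : m = x := by
      have h1 : m ≤ x := hmin x hxl
      have h2 : x ≤ m := by
        rcases List.mem_cons.1 (hp.mem_iff.1 hmem) with h | h
        · exact le_of_eq h.symm
        · exact (List.pairwise_cons.1 hs).1 m h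
      exact le_antisymm h1 h2
    subst hmx
    constructor
    · unfold heapPop?
      rw [hm]; dsimp only
      rw [PySem.List.remove?_eq_some_erase l m hmem]
    · have := hp.erase m
      rwa [List.erase_cons_head] at this

theorem insPos_nil (new : Int) (i : Nat) : insPos [] new i = i := by
  rw [insPos]; simp

theorem insPos_le_aux (new : Int) : ∀ (k : Nat) (s : List Int) (i : Nat),
    s.length - i ≤ k → i ≤ s.length → insPos s new i ≤ s.length := by
  intro k
  induction k with
  | zero =>
    intro s i hk hi
    rw [insPos]
    have hni : ¬ i < s.length := by omega
    simp [hni, hi]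
  | succ k ih =>
    intro s i hk hi
    rw [insPos]
    by_cases h : i < s.length
    · simp only [h, dif_pos]
      by_cases hlt : s[i] < new
      · simp only [hlt, if_pos]
        exact ih s (i + 1) (by omega) (by omega)
      · simp only [hlt, if_neg, not_false_iff]; exact hi
    · simp [h, hi]

theorem insPos_le (s : List Int) (new : Int) : insPos s new 0 ≤ s.length :=
  insPos_le_aux new s.length s 0 (by omega) (by omega)

theorem insPos_cons_aux (b new : Int) : ∀ (k : Nat) (s : List Int) (i : Nat),
    s.length - i ≤ k → insPos (b :: s) new (i + 1) = insPos s new i + 1 := by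
  intro k
  induction k with
  | zero =>
    intro s i hk
    conv_lhs => rw [insPos]
    conv_rhs => rw [insPos]
    have h2 : ¬ i < s.length := by omega
    have h1 : ¬ i + 1 < (b :: s).length := by simp; omega
    simp only [h1, dif_neg, not_false_iff, h2]
  | succ k ih =>
    intro s i hk
    conv_lhs => rw [insPos]
    by_cases h : i < s.length
    · have h1 : i + 1 < (b :: s).length := by simp; omega
      simp only [h1, dif_pos, List.getElem_cons_succ]
      by_cases hlt : s[i]'h < new
      · simp only [hlt, if_pos]
        rw [ih s (i + 1) (by omega)]
        conv_rhs => rw [insPos]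
        simp [h, hlt]
      · simp only [hlt, if_neg, not_false_iff]
        conv_rhs => rw [insPos]
        simp [h, hlt]
    · have h1 : ¬ i + 1 < (b :: s).length := by simp; omega
      conv_rhs => rw [insPos]
      simp only [h1, dif_neg, not_false_iff, h]

theorem insPos_cons_succ (b new : Int) (s : List Int) (i : Nat) :
    insPos (b :: s) new (i + 1) = insPos s new i + 1 :=
  insPos_cons_aux b new (s.length - i) s i le_rfl

theorem insert_insPos_eq_orderedInsert (s : List Int) (new : Int) :
    PySem.List.insert s ((insPos s new 0 : Nat) : Int) new
      = List.orderedInsert (· ≤ ·) new s := by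
  induction s with
  | nil =>
    rw [insPos_nil]
    simp [PySem.List.insert_zero, List.orderedInsert]
  | cons b l ih =>
    rw [insPos]
    have h0 : 0 < (b :: l).length := by simp
    simp only [h0, dif_pos]
    have hget : (b :: l)[0]'h0 = b := rfl
    rw [hget]
    by_cases hb : b < new
    · simp only [hb, if_pos]
      rw [show (0 : Nat) + 1 = 1 from rfl, show (1 : Nat) = 0 + 1 from rfl,
        insPos_cons_succ b new l 0]
      have hp : insPos l new 0 ≤ l.length := insPos_le l new
      rw [PySem.List.insert_natCast (b :: l) (insPos l new 0 + 1) new (by simp; omega)]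
      rw [PySem.List.insert_natCast l (insPos l new 0) new hp] at ih
      rw [List.orderedInsert, if_neg (by exact not_le.2 hb)]
      simp only [List.take_succ_cons, List.drop_succ_cons, List.cons_append]
      rw [ih]
    · simp only [hb, if_neg, not_false_iff]
      rw [show ((0 : Nat) : Int) = 0 from rfl, PySem.List.insert_zero]
      rw [List.orderedInsert, if_pos (not_lt.1 hb)]

theorem loop_eq (K : Int) : ∀ (n : Nat) (l s : List Int) (ans : Int),
    s.length = n → l.Perm s → s.Pairwise (· ≤ ·) → l ≠ [] →
    loopA K l ans = loopB K s ans := by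
  intro n
  induction n with
  | zero =>
    intro l s ans hlen hperm _ hne
    have hs : s = [] := List.length_eq_zero_iff.1 hlen
    subst hs
    exact absurd hperm.eq_nil hne
  | succ n ih =>
    intro l s ans hlen hperm hpair hne
    cases s with
    | nil => exact absurd (hperm.eq_nil) hne
    | cons x t =>
      obtain ⟨hpop, hrest⟩ := heapPop?_of_perm_sorted hperm hpair
      have hlenls : l.length = t.length + 1 := by
        rw [hperm.length_eq]; simp
      rw [loopA, loopB.eq_def]
      dsimp only
      by_cases hxK : x < K
      · cases t with
        | nil =>
          -- single element below K: both return -1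
          have hl : l = [x] := List.perm_singleton.1 hperm
          subst hl
          simp [hxK]
        | cons b rest =>
          have hg : ¬ (l.length = 1 ∧ l.headD 0 < K) := by
            intro hcontra; rw [hlenls] at hcontra; simp at hcontra
          simp only [hg, if_false]
          split
          · next heq => rw [hpop] at heq; cases heq
          · next a r heq =>
            rw [hpop] at heq
            injection heq with heq
            injection heq with ha hr
            subst ha; subst hr
            simp only [hxK, if_pos]
            have hpairt : (b :: rest).Pairwise (· ≤ ·) := (List.pairwise_cons.1 hpair).2
            obtain ⟨hpop2, hrest2⟩ := heapPop?_of_perm_sorted hrest hpairt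
            split
            · next heq2 => rw [hpop2] at heq2; cases heq2
            · next b' r2 heq2 =>
              rw [hpop2] at heq2
              injection heq2 with heq2
              injection heq2 with hb2 hr2
              subst hb2; subst hr2
              -- B side: reduce the outer if / match
              have hlen1 : ¬ (x :: b :: rest).length = 1 := by simp
              simp only [hlen1, if_false]
              rw [insert_insPos_eq_orderedInsert rest (x + 2 * b)]
              rw [show x + b * 2 = x + 2 * b from by ring]
              have hperm' : ((x + 2 * b) :: (l.erase x).erase b).Perm
                  (List.orderedInsert (· ≤ ·) (x + 2 * b) rest) :=
                (List.Perm.cons _ hrest2).trans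
                  (List.perm_orderedInsert (· ≤ ·) (x + 2 * b) rest).symm
              have hpair' : (List.orderedInsert (· ≤ ·) (x + 2 * b) rest).Pairwise (· ≤ ·) :=
                List.Pairwise.orderedInsert _ rest (List.pairwise_cons.1 hpairt).2
              have hlen' : (List.orderedInsert (· ≤ ·) (x + 2 * b) rest).length = n := by
                rw [(List.perm_orderedInsert (· ≤ ·) (x + 2 * b) rest).length_eq]
                simp at hlen ⊢
                omega
              exact ih _ _ (ans + 1) hlen' hperm' hpair' (by simp)
      · -- min ≥ K: both stop
        have hg : ¬ (l.length = 1 ∧ l.headD 0 < K) := by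
          rintro ⟨h1, h2⟩
          rw [h1] at hlenls
          have ht : t = [] := by simpa using hlenls.symm
          subst ht
          have hl : l = [x] := List.perm_singleton.1 hperm
          subst hl
          simp at h2
          exact hxK h2
        simp only [hg, if_false]
        split
        · next heq => rw [hpop] at heq; cases heq
        · next a r heq =>
          rw [hpop] at heq
          injection heq with heq
          injection heq with ha hr
          subst ha; subst hr
          simp [hxK]

-- ===== VERDICT (by name: the statement is the Claim_ definition above) =====
theorem solution_spec : Claim_equal_solution := by
  intro scoville K _ hpre
  unfold Spec_solution solution solution_alt
  exact loop_eq K _ scoville _ 0 rfl (PySem.List.sorted_perm scoville (fun x => x) false).symm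
    (by simpa using PySem.List.sorted_pairwise scoville (fun x => x)) hpre
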